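-- pv_equiv track=rewrite | github.com/GuilhermeSSouza/Trabalho3AP | Vitor/Arquivos/geral.py | pesos
-- ===== SOURCE A (Python) =====
-- def pesos(matrizDissiInt):
-- 	pesos = list()
-- 	for i in range(len(matrizDissiInt)):
-- 		for j in range(len(matrizDissiInt[0])):
-- 			if(i == j):
-- 				pesos.append(-1)
-- 			else:
-- 				pesos.append(matrizDissiInt[i][j])
-- 	return pesos
-- ===== SOURCE B (Python) =====
-- def pesos(matrizDissiInt):
--     if not matrizDissiInt:
--         return []
--     cols = len(matrizDissiInt[0])
--     flat = []
--     for row in matrizDissiInt: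
--         flat.extend(row[:cols])
--     for i in range(min(len(matrizDissiInt), cols)):
--         flat[i * cols + i] = -1
--     return flat
-- ===== Notes on version B (the rewrite author's own statement) =====
-- stated objective: alternative
-- what changed: B flattens all rows (truncated to the first row's width) in one unconditional pass and then overwrites the diagonal positions i*cols+i with -1 in a separate index-arithmetic pass, instead of A's per-element i==j test inside nested index loops; Pre_ excludes ragged matrices (a row shorter than the first row), outside the natural rectangular domain, where A usually raises IndexError and otherwise returns an accidental misaligned flattening.
-- outside the precondition, e.g. on pesos([[1, 2], [3]]): A returns [-1, 2, 3, -1], B raises IndexError; on pesos([[1, 2], [3], [4, 5]]): A returns [-1, 2, 3, -1, 4, 5], B returns [-1, 2, 3, -1, 5]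
import Mathlib
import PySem

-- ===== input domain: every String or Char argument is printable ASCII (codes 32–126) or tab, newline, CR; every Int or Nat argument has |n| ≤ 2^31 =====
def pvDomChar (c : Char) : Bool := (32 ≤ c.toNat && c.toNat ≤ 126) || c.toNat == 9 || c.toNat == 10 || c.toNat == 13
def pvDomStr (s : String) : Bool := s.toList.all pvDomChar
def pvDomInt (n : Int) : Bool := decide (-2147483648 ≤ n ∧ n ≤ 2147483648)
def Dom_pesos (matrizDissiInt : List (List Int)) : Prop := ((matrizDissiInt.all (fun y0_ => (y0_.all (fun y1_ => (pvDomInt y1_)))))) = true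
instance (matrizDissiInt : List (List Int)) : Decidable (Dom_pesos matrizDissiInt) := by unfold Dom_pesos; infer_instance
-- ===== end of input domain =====

-- B replaces A's per-element diagonal test by an unconditional flatten pass plus a
-- second pass overwriting positions i*cols+i: a different decomposition of the same O(rows*cols) work.

-- ===== PORT A =====
def pesos (matrizDissiInt : List (List Int)) : List Int :=
  (PySem.List.pyRange 0 (matrizDissiInt.length : Int) 1).foldl (fun acc i =>
    (PySem.List.pyRange 0 ((PySem.List.pyGetD matrizDissiInt 0 []).length : Int) 1).foldl
      (fun acc2 j =>
        if i == j then acc2 ++ [(-1 : Int)]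
        else acc2 ++ [PySem.List.pyGetD (PySem.List.pyGetD matrizDissiInt i []) j 0]) acc) []

-- ===== PORT B =====
def pesos_alt (matrizDissiInt : List (List Int)) : List Int :=
  match matrizDissiInt with
  | [] => []
  | r0 :: _ =>
    let cols := r0.length
    let flat := matrizDissiInt.foldl
      (fun acc row => acc ++ PySem.List.slice row none (some (cols : Int))) []
    (PySem.List.pyRange 0 ((min matrizDissiInt.length cols : Nat) : Int) 1).foldl
      (fun f i => PySem.List.pySetD f (i * (cols : Int) + i) (-1)) flat

-- ===== PRECONDITION & SPEC =====
-- Pre_ excludes ragged matrices in which some row is shorter than the first row: they are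
-- outside the natural rectangular-matrix domain; A usually raises IndexError there, and in the
-- degenerate cases where the only missing column of a row is its own diagonal one, A's returned
-- misaligned flattening is an accident of its i==j shortcut (B raises or returns its own
-- truncated flattening there).
def Pre_pesos (matrizDissiInt : List (List Int)) : Prop :=
  ∀ r ∈ matrizDissiInt, (matrizDissiInt.headD []).length ≤ r.length
instance (matrizDissiInt : List (List Int)) : Decidable (Pre_pesos matrizDissiInt) := by
  unfold Pre_pesos; infer_instance
def pvWitness_pesos : List (List Int) := [[1, 2], [3, 4]]
def Spec_pesos (matrizDissiInt : List (List Int)) (out : List Int) : Prop :=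
  out = pesos_alt matrizDissiInt
instance (matrizDissiInt : List (List Int)) (out : List Int) : Decidable (Spec_pesos matrizDissiInt out) := by
  unfold Spec_pesos; infer_instance

-- ===== CLAIM (what is proved, stated in full; the proofs are below) =====
def Claim_equal_pesos : Prop := ∀ (matrizDissiInt : List (List Int)), Dom_pesos matrizDissiInt → Pre_pesos matrizDissiInt → Spec_pesos matrizDissiInt (pesos matrizDissiInt)

-- ===== LEMMAS AND PROOFS =====

-- generic: a foldl that appends a block per element is flatMap
lemma pv_foldl_append_flatMap {α : Type} (g : α → List Int) :
    ∀ (l : List α) (acc : List Int),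
      l.foldl (fun a x => a ++ g x) acc = acc ++ l.flatMap g := by
  intro l
  induction l with
  | nil => simp
  | cons x xs ih => intro acc; simp [List.foldl_cons, ih, List.flatMap_cons]

lemma pv_flatMap_map_nat {α : Type} (f : Nat → Nat) (g : Nat → List α) (l : List Nat) :
    (l.map f).flatMap g = l.flatMap (fun x => g (f x)) := by
  induction l <;> simp_all

-- characterisation of port A as a flatMap of per-row chunks
lemma pesos_char (m : List (List Int)) :
    pesos m = (List.range m.length).flatMap (fun i =>
      (List.range (PySem.List.pyGetD m 0 ([] : List Int)).length).map (fun j =>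
        if i = j then (-1 : Int) else ((m.getD i []).getD j 0))) := by
  unfold pesos
  have hinner : ∀ (ki : Nat) (acc : List Int),
      (PySem.List.pyRange 0 ((PySem.List.pyGetD m 0 ([] : List Int)).length : Int) 1).foldl
        (fun acc2 j =>
          if (ki : Int) == j then acc2 ++ [(-1 : Int)]
          else acc2 ++ [PySem.List.pyGetD (PySem.List.pyGetD m (ki : Int) []) j 0]) acc
      = acc ++ (List.range (PySem.List.pyGetD m 0 ([] : List Int)).length).map (fun j =>
          if ki = j then (-1 : Int) else ((m.getD ki []).getD j 0)) := by
    intro ki acc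
    rw [PySem.List.pyRange_zero_natCast (PySem.List.pyGetD m 0 ([] : List Int)).length,
      List.foldl_map]
    have hb : (fun (acc2 : List Int) (kj : Nat) =>
        if (ki : Int) == (kj : Int) then acc2 ++ [(-1 : Int)]
        else acc2 ++ [PySem.List.pyGetD (PySem.List.pyGetD m (ki : Int) []) (kj : Int) 0])
        = fun acc2 kj => acc2 ++ [if ki = kj then (-1 : Int) else ((m.getD ki []).getD kj 0)] := by
      funext acc2 kj
      simp only [PySem.List.pyGetD_natCast, beq_iff_eq, Nat.cast_inj]
      split <;> rfl
    rw [hb, PySem.List.foldl_append_singleton_eq_map]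
  rw [PySem.List.pyRange_zero_natCast m.length, List.foldl_map]
  simp only [hinner]
  exact pv_foldl_append_flatMap _ _ []

-- characterisation of port B (nonempty case)
lemma pesos_alt_char (r0 : List Int) (rest : List (List Int)) :
    pesos_alt (r0 :: rest) = (List.range (min (r0 :: rest).length r0.length)).foldl
      (fun f i => f.set (i * r0.length + i) (-1))
      (((r0 :: rest).map (fun row => row.take r0.length)).flatten) := by
  unfold pesos_alt
  simp only []
  rw [pv_foldl_append_flatMap (fun row => PySem.List.slice row none (some (r0.length : Int)))]
  simp only [PySem.List.slice_to_natCast, List.nil_append]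
  rw [PySem.List.pyRange_zero_natCast, List.foldl_map]
  have hb : (fun (f : List Int) (k : Nat) =>
      PySem.List.pySetD f ((k : Int) * (r0.length : Int) + (k : Int)) (-1))
      = fun (f : List Int) (k : Nat) => f.set (k * r0.length + k) (-1) := by
    funext f k
    rw [show ((k : Int) * (r0.length : Int) + (k : Int)) = ((k * r0.length + k : Nat) : Int) by
      push_cast; ring, PySem.List.pySetD_natCast]
  rw [hb, List.flatMap_def]

-- setting at offsets past a fixed prefix acts on the suffix
lemma pv_set_offset_fold (xs : List Int) :
    ∀ (l : List Nat) (p : Nat → Nat) (ys : List Int),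
      l.foldl (fun f i => f.set (xs.length + p i) (-1)) (xs ++ ys)
      = xs ++ l.foldl (fun f i => f.set (p i) (-1)) ys := by
  intro l
  induction l with
  | nil => simp
  | cons a t ih =>
    intro p ys
    rw [List.foldl_cons, List.foldl_cons, List.set_append]
    have h1 : ¬ (xs.length + p a < xs.length) := by omega
    simp only [h1, if_false, Nat.add_sub_cancel_left]
    exact ih p (ys.set (p a) (-1))

-- a diagonal whose column offset is past the row width touches nothing
lemma pv_mapIdx_no_touch (c : Nat) :
    ∀ (L : List (List Int)) (d : Nat), c ≤ d →
      L.mapIdx (fun i ch => if i + d < c then ch.set (i + d) (-1) else ch) = L := by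
  intro L
  induction L with
  | nil => simp
  | cons a t ih =>
    intro d hd
    rw [List.mapIdx_cons]
    have h0 : ¬ (0 + d < c) := by omega
    simp only [h0, if_false]
    have hfun : (fun (i : Nat) (ch : List Int) => if (i + 1) + d < c then ch.set ((i + 1) + d) (-1) else ch)
        = fun (i : Nat) (ch : List Int) => if i + (d + 1) < c then ch.set (i + (d + 1)) (-1) else ch := by
      funext i ch
      rw [show (i + 1) + d = i + (d + 1) by omega]
    rw [hfun, ih (d + 1) (by omega)]

-- core: the overwrite pass on the flattened rows is a per-row diagonal set
lemma pv_core (c : Nat) :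
    ∀ (L : List (List Int)) (d : Nat), (∀ ch ∈ L, ch.length = c) →
      (List.range (min L.length (c - d))).foldl (fun f i => f.set (i * c + i + d) (-1)) L.flatten
      = (L.mapIdx (fun i ch => if i + d < c then ch.set (i + d) (-1) else ch)).flatten := by
  intro L
  induction L with
  | nil => intro d _; simp
  | cons ch rest ih =>
    intro d hL
    have hch : ch.length = c := hL ch (by simp)
    have hrest : ∀ x ∈ rest, x.length = c := fun x hx => hL x (by simp [hx])
    by_cases hd : d < c
    · have hmin : min (ch :: rest).length (c - d) = min rest.length (c - (d + 1)) + 1 := by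
        simp only [List.length_cons]; omega
      rw [hmin, List.range_succ_eq_map, List.foldl_cons, List.foldl_map, List.flatten_cons]
      have e0 : 0 * c + 0 + d = d := by omega
      rw [e0, List.set_append]
      have hdch : d < ch.length := by omega
      simp only [hdch, if_true]
      have hb : (fun (f : List Int) (i : Nat) => f.set (Nat.succ i * c + Nat.succ i + d) (-1))
          = fun (f : List Int) (i : Nat) => f.set ((ch.set d (-1)).length + (i * c + i + (d + 1))) (-1) := by
        funext f i
        congr 1
        rw [List.length_set, hch, Nat.succ_mul]
        omega
      rw [hb, pv_set_offset_fold, ih (d + 1) hrest, List.mapIdx_cons]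
      have h0 : 0 + d < c := by omega
      simp only [Nat.zero_add, List.flatten_cons]
      have hfun : (fun (i : Nat) (x : List Int) => if (i + 1) + d < c then x.set ((i + 1) + d) (-1) else x)
          = fun (i : Nat) (x : List Int) => if i + (d + 1) < c then x.set (i + (d + 1)) (-1) else x := by
        funext i x
        rw [show (i + 1) + d = i + (d + 1) by omega]
      rw [hfun]
      simp [hd]
    · have h1 : c - d = 0 := by omega
      rw [h1]
      simp only [Nat.min_zero, List.range_zero, List.foldl_nil]
      rw [pv_mapIdx_no_touch c (ch :: rest) d (by omega)]

-- mapIdx-then-flatten read off as flatMap over indices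
lemma pv_mapIdx_flatten (F : Nat → List Int → List Int) :
    ∀ (M : List (List Int)),
      (M.mapIdx F).flatten = (List.range M.length).flatMap (fun i => F i (M.getD i [])) := by
  intro M
  induction M generalizing F with
  | nil => simp
  | cons a t ih =>
    rw [List.mapIdx_cons, List.flatten_cons, ih (fun i => F (i + 1)),
      List.length_cons, List.range_succ_eq_map, List.flatMap_cons, pv_flatMap_map_nat]
    simp [Nat.succ_eq_add_one]

-- one row: A's mapped chunk is B's take-then-set chunk
lemma pv_chunk_eq (row : List Int) (c i : Nat) (hlen : c ≤ row.length) :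
    (List.range c).map (fun j => if i = j then (-1 : Int) else row.getD j 0)
    = if i + 0 < c then (row.take c).set (i + 0) (-1) else row.take c := by
  simp only [Nat.add_zero]
  by_cases hi : i < c
  · simp only [hi, if_true]
    apply List.ext_getElem
    · simp only [List.length_map, List.length_range, List.length_set, List.length_take]
      omega
    · intro j hj1 hj2
      simp only [List.getElem_map, List.getElem_range, List.getElem_set]
      have hjc : j < c := by simpa using hj1
      have hjr : j < row.length := by omega
      rw [List.getElem_take]
      rw [List.getD_eq_getElem row 0 hjr]
  · simp only [hi, if_false]
    apply List.ext_getElem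
    · simp only [List.length_map, List.length_range, List.length_take]; omega
    · intro j hj1 hj2
      simp only [List.getElem_map, List.getElem_range]
      have hjc : j < c := by simpa using hj1
      have hij : ¬ (i = j) := by omega
      have hjr : j < row.length := by omega
      simp only [hij, if_false]
      rw [List.getElem_take, List.getD_eq_getElem row 0 hjr]

-- ===== VERDICT (by name: the statement is the Claim_ definition above) =====
theorem pesos_spec : Claim_equal_pesos := by
  intro m _ hpre
  unfold Spec_pesos
  match m with
  | [] => decide
  | r0 :: rest =>
    rw [pesos_char, pesos_alt_char]
    have hpre' : ∀ r ∈ (r0 :: rest), r0.length ≤ r.length := by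
      intro r hr
      simpa using hpre r hr
    have hlens : ∀ ch ∈ (r0 :: rest).map (fun row => row.take r0.length), ch.length = r0.length := by
      intro ch hch
      rcases List.mem_map.mp hch with ⟨row, hrow, rfl⟩
      simp only [List.length_take]
      exact Nat.min_eq_left (hpre' row hrow)
    have hfun : (fun (f : List Int) (i : Nat) => f.set (i * r0.length + i) (-1))
        = fun (f : List Int) (i : Nat) => f.set (i * r0.length + i + 0) (-1) := by
      funext f i; rw [Nat.add_zero]
    have hmin : min (r0 :: rest).length r0.length
        = min ((r0 :: rest).map (fun row => row.take r0.length)).length (r0.length - 0) := by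
      simp
    rw [hfun, hmin, pv_core r0.length _ 0 hlens, pv_mapIdx_flatten]
    simp only [List.length_map]
    apply List.flatMap_congr
    intro i hi
    have hilen : i < (r0 :: rest).length := by simpa using hi
    have hrow : ((r0 :: rest).map (fun row => row.take r0.length)).getD i []
        = ((r0 :: rest).getD i []).take r0.length := by
      rw [List.getD_eq_getElem _ _ (by simpa using hilen), List.getD_eq_getElem _ _ hilen,
        List.getElem_map]
    rw [hrow, PySem.List.pyGetD_zero_cons]
    have hmem : (r0 :: rest).getD i [] ∈ (r0 :: rest) := by
      rw [List.getD_eq_getElem _ _ hilen]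
      exact List.getElem_mem hilen
    exact pv_chunk_eq _ _ _ (hpre' _ hmem)
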